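-- pv_equiv track=rewrite | github.com/ftjahn8/orphan-detection | src/dude_functions.py | count_char_occurrance
-- ===== SOURCE A (Python) =====
-- def count_char_occurrance(links, max_len):
--     position_count = [0 for _ in range(max_len)]
--     counts = {}
--
--     # Count the occurrence of characters at each position in the link
--     for link in links:
--         for i, c in enumerate(link):
--             if i in counts:
--                 if not c in counts[i]:
--                     counts[i][c] = 1
--                     position_count[i] += 1
--                 else:
--                     counts[i][c] += 1
--             else:
--                 counts[i] = {c: 1}
--                 position_count[i] += 1
--
--     return position_count, counts
-- ===== SOURCE B (Python) =====
-- def count_char_occurrance(links, max_len):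
--     # Column-major rewrite: instead of scanning each link left-to-right and
--     # branching on dict membership, scan one character POSITION at a time
--     # across all links, building that column's frequency dict in one go.
--     width = 0
--     for link in links:
--         if len(link) > width:
--             width = len(link)
--
--     counts = {}
--     for i in range(width):
--         col = {}
--         for link in links:
--             if i < len(link):
--                 c = link[i]
--                 col[c] = col.get(c, 0) + 1
--         counts[i] = col
--
--     position_count = [0] * max_len
--     for i in range(width):
--         position_count[i] = len(counts[i])
--
--     return position_count, counts
-- ===== Notes on version B (the rewrite author's own statement) =====
-- stated objective: alternative
-- what changed: B traverses column-major: it first computes the maximum link length, then for each character position scans that column across all links to build its frequency dict in one go, instead of A's row-major scan over each link with membership branches and incremental position_count bookkeeping.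
import Mathlib
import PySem

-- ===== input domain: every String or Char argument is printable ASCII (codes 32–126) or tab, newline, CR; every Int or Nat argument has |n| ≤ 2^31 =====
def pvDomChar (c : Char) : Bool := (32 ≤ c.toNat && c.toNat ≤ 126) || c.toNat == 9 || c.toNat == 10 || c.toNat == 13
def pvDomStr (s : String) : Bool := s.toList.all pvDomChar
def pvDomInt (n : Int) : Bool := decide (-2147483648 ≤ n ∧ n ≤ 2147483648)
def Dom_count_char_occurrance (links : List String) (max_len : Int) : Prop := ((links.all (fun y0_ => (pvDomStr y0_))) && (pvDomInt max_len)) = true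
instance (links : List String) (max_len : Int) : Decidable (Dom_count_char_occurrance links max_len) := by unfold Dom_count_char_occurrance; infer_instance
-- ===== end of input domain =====

-- B traverses column-major (one character position at a time across all links) instead of A's
-- row-major scan with membership branches; same return value (alternative decomposition).

-- ===== PORT A =====
-- position_count[i] += 1 (the index is in range on every input Pre_ admits)
def pvIncAt (pc : List Int) (i : Int) : List Int :=
  pc.set i.toNat (pc.getD i.toNat 0 + 1)

-- the body of A's inner loop, one (i, c) pair
def pvStepA (st : List Int × PySem.Dict Int (PySem.Dict String Int)) (p : Int × Char) :
    List Int × PySem.Dict Int (PySem.Dict String Int) :=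
  let s : String := String.ofList [p.2]
  match st.2.get? p.1 with
  | some d =>
      if d.contains s = false then
        (pvIncAt st.1 p.1, st.2.insert p.1 (d.insert s 1))
      else
        (st.1, st.2.insert p.1 (d.insert s (d.getD s 0 + 1)))
  | none => (pvIncAt st.1 p.1, st.2.insert p.1 (PySem.Dict.empty.insert s 1))

def count_char_occurrance (links : List String) (max_len : Int) :
    List Int × (List (Int × List (String × Int))) :=
  let position_count : List Int := (PySem.List.pyRange 0 max_len 1).map (fun _ => (0 : Int))
  let st := links.foldl
    (fun st link => (PySem.List.enumerate link.toList).foldl pvStepA st)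
    (position_count, PySem.Dict.empty)
  (st.1, st.2.items.map (fun q => (q.1, q.2.items)))

-- ===== PORT B =====
-- width = 0; for link in links: if len(link) > width: width = len(link)
def pvWidth (links : List String) : Nat :=
  links.foldl (fun w l => if l.toList.length > w then l.toList.length else w) 0

-- col[c] = col.get(c, 0) + 1
def pvColStep (col : PySem.Dict String Int) (c : Char) : PySem.Dict String Int :=
  col.insert (String.ofList [c]) (col.getD (String.ofList [c]) 0 + 1)

-- the i-th column's frequency dict: for link in links: if i < len(link): count link[i]
def pvCol (links : List String) (i : Nat) : PySem.Dict String Int :=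
  links.foldl (fun col link =>
    match link.toList[i]? with
    | some c => pvColStep col c
    | none => col) PySem.Dict.empty

def count_char_occurrance_alt (links : List String) (max_len : Int) :
    List Int × (List (Int × List (String × Int))) :=
  let width := pvWidth links
  let counts := (PySem.List.pyRange 0 (width : Int) 1).foldl
    (fun cs i => cs.insert i (pvCol links i.toNat)) PySem.Dict.empty
  let position_count := (PySem.List.pyRange 0 (width : Int) 1).foldl
    (fun pc i => pc.set i.toNat (((counts.getD i PySem.Dict.empty).size : Int)))
    (List.replicate max_len.toNat 0)
  (position_count, counts.items.map (fun q => (q.1, q.2.items)))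

-- ===== PRECONDITION & SPEC =====
-- Pre_ excludes exactly the inputs on which the Python A raises IndexError:
-- some link longer than max_len (a negative max_len acting as 0).
def Pre_count_char_occurrance (links : List String) (max_len : Int) : Prop :=
  ∀ s ∈ links, ((PySem.Str.len s : Int) ≤ max_len ∨ PySem.Str.len s = 0)
instance (links : List String) (max_len : Int) : Decidable (Pre_count_char_occurrance links max_len) := by unfold Pre_count_char_occurrance; infer_instance
def pvWitness_count_char_occurrance : List String × Int := (["ab", "a", ""], 3)

def Spec_count_char_occurrance (links : List String) (max_len : Int) (out : List Int × (List (Int × List (String × Int)))) : Prop := out = count_char_occurrance_alt links max_len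
instance (links : List String) (max_len : Int) (out : List Int × (List (Int × List (String × Int)))) : Decidable (Spec_count_char_occurrance links max_len out) := by unfold Spec_count_char_occurrance; infer_instance

-- ===== CLAIM (what is proved, stated in full; the proofs are below) =====
def Claim_equal_count_char_occurrance : Prop := ∀ (links : List String) (max_len : Int), Dom_count_char_occurrance links max_len → Pre_count_char_occurrance links max_len → Spec_count_char_occurrance links max_len (count_char_occurrance links max_len)

-- ===== LEMMAS AND PROOFS =====

-- the dict update A's step performs, isolated from its position_count bookkeeping
def pvDictStep (cs : PySem.Dict Int (PySem.Dict String Int)) (p : Int × Char) :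
    PySem.Dict Int (PySem.Dict String Int) :=
  cs.insert p.1 (pvColStep (cs.getD p.1 PySem.Dict.empty) p.2)

def pvDictFold (links : List String) : PySem.Dict Int (PySem.Dict String Int) :=
  links.foldl (fun cs link => (PySem.List.enumerate link.toList).foldl pvDictStep cs)
    PySem.Dict.empty

-- keys of the counts dict are distinct and nonnegative (maintained by A's loop)
def pvInv (cs : PySem.Dict Int (PySem.Dict String Int)) : Prop :=
  cs.keys.Nodup ∧ ∀ k ∈ cs.keys, 0 ≤ k

-- A's position_count is determined by the counts dict: entry j is the number of
-- distinct chars recorded at position j (0 while position j is unpopulated)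
def pvRel (N : Nat) (pc : List Int) (cs : PySem.Dict Int (PySem.Dict String Int)) : Prop :=
  pc.length = N ∧ ∀ j : Nat, j < N →
    pc.getD j 0 = (match cs.get? (j : Int) with
                   | some d => (d.size : Int)
                   | none => 0)

theorem pvStep_eq (N : Nat) (pc : List Int) (cs : PySem.Dict Int (PySem.Dict String Int))
    (p : Int × Char) (hp : 0 ≤ p.1) (hinv : pvInv cs) (hrel : pvRel N pc cs) :
    (pvStepA (pc, cs) p).2 = pvDictStep cs p ∧ pvInv (pvDictStep cs p) ∧
      pvRel N (pvStepA (pc, cs) p).1 (pvDictStep cs p) := by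
  obtain ⟨i, c⟩ := p
  obtain ⟨hnd, hpos⟩ := hinv
  obtain ⟨hlen, hval⟩ := hrel
  simp only at hp
  have hne_of_ne : ∀ j : Nat, (j : Int) ≠ i → j ≠ i.toNat := by
    intro j hj hj'
    exact hj (by rw [hj', Int.toNat_of_nonneg hp])
  cases hc : cs.get? i with
  | none =>
    have hB : pvDictStep cs (i, c) =
        cs.insert i (PySem.Dict.empty.insert (String.ofList [c]) (0 + 1)) := by
      simp only [pvDictStep, pvColStep]
      rw [PySem.Dict.getD_of_get?_eq_none _ _ hc, PySem.Dict.getD_empty]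
    have hA : pvStepA (pc, cs) (i, c) =
        (pvIncAt pc i, cs.insert i (PySem.Dict.empty.insert (String.ofList [c]) 1)) := by
      simp only [pvStepA, hc]
    rw [hA, hB]
    norm_num
    refine ⟨⟨PySem.Dict.nodup_keys_insert _ _ _ hnd, ?_⟩, ?_, ?_⟩
    · intro k hk
      rcases (PySem.Dict.mem_keys_insert _ _ _ _).1 hk with h | h
      · omega
      · exact hpos k h
    · simpa [pvIncAt] using hlen
    · intro j hj
      by_cases hji : (j : Int) = i
      · have hjt : j = i.toNat := by omega
        rw [hji, PySem.Dict.get?_insert_self]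
        simp only [pvIncAt, PySem.Dict.size_insert, PySem.Dict.contains_empty,
          PySem.Dict.size_empty]
        have hlt : i.toNat < pc.length := by omega
        rw [← hjt]
        rw [show (pc.set j (pc.getD j 0 + 1)).getD j 0 = pc.getD j 0 + 1 by
          simp [List.getD_eq_getElem?_getD, show j < pc.length by omega]]
        have h0 := hval j hj
        rw [hji, hc] at h0
        simp only at h0
        simpa [List.getD_eq_getElem?_getD] using h0
      · rw [PySem.Dict.get?_insert_of_ne _ _ hji]
        have := hne_of_ne j hji
        simp only [pvIncAt]
        rw [show (pc.set i.toNat (pc.getD i.toNat 0 + 1)).getD j 0 = pc.getD j 0 by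
          simp [List.getD_eq_getElem?_getD, (hne_of_ne j hji).symm]]
        exact hval j hj
  | some d =>
    have hB : pvDictStep cs (i, c) =
        cs.insert i (d.insert (String.ofList [c]) (d.getD (String.ofList [c]) 0 + 1)) := by
      simp only [pvDictStep, pvColStep]
      rw [PySem.Dict.getD_of_get?_eq_some _ _ hc]
    have hkeys : ∀ hx : PySem.Dict String Int, pvInv (cs.insert i hx) := by
      refine fun hx => ⟨PySem.Dict.nodup_keys_insert _ _ _ hnd, ?_⟩
      intro k hk
      rcases (PySem.Dict.mem_keys_insert _ _ _ _).1 hk with h | h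
      · omega
      · exact hpos k h
    by_cases hcs : d.contains (String.ofList [c]) = true
    · have hA : pvStepA (pc, cs) (i, c) =
          (pc, cs.insert i (d.insert (String.ofList [c]) (d.getD (String.ofList [c]) 0 + 1))) := by
        simp only [pvStepA, hc, hcs]
        simp
      rw [hA, hB]
      refine ⟨rfl, hkeys _, hlen, ?_⟩
      intro j hj
      by_cases hji : (j : Int) = i
      · rw [hji, PySem.Dict.get?_insert_self]
        have h0 := hval j hj
        rw [hji, hc] at h0
        simp only at h0
        simp only [PySem.Dict.size_insert, hcs, if_true]
        simpa using h0
      · rw [PySem.Dict.get?_insert_of_ne _ _ hji]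
        exact hval j hj
    · have hcs' : d.contains (String.ofList [c]) = false := by
        simpa using hcs
      have hA : pvStepA (pc, cs) (i, c) =
          (pvIncAt pc i, cs.insert i (d.insert (String.ofList [c]) 1)) := by
        simp only [pvStepA, hc, hcs']
        simp
      rw [hA, hB, PySem.Dict.getD_of_not_contains _ _ hcs']
      norm_num
      refine ⟨hkeys _, by simpa [pvIncAt] using hlen, ?_⟩
      intro j hj
      by_cases hji : (j : Int) = i
      · rw [hji, PySem.Dict.get?_insert_self]
        simp only [pvIncAt, PySem.Dict.size_insert, hcs']
        norm_num
        have hjt : j = i.toNat := by omega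
        rw [← hjt]
        have h0 := hval j hj
        rw [hji, hc] at h0
        simp only at h0
        rw [List.getD_eq_getElem?_getD] at h0
        simp [show j < pc.length by omega]
        rw [List.getElem?_eq_getElem (show j < pc.length by omega)] at h0
        simpa using h0
      · rw [PySem.Dict.get?_insert_of_ne _ _ hji]
        simp only [pvIncAt]
        rw [show (pc.set i.toNat (pc.getD i.toNat 0 + 1)).getD j 0 = pc.getD j 0 by
          simp [List.getD_eq_getElem?_getD, (hne_of_ne j hji).symm]]
        exact hval j hj

-- the canonical column-wise description of the counts dict
def pvG (W : Nat) (g : Nat → PySem.Dict String Int) (i : Nat) : PySem.Dict String Int :=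
  if i < W then g i else PySem.Dict.empty

def pvUpd (t : List Char) (k W : Nat) (g : Nat → PySem.Dict String Int) (i : Nat) :
    PySem.Dict String Int :=
  match t[i - k]? with
  | some c => if k ≤ i then pvColStep (pvG W g i) c else pvG W g i
  | none => pvG W g i

def pvCanonD (W : Nat) (g : Nat → PySem.Dict String Int) : PySem.Dict Int (PySem.Dict String Int) :=
  PySem.Dict.mk ((List.range W).map (fun i : Nat => ((i : Int), g i)))

theorem pvGet_canonD (W : Nat) (g : Nat → PySem.Dict String Int) (j : Nat) :
    (pvCanonD W g).get? (j : Int) = if j < W then some (g j) else none := by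
  have hkeys : (pvCanonD W g).keys = (List.range W).map (fun i : Nat => (i : Int)) := by
    simp [pvCanonD, PySem.Dict.keys, List.map_map, Function.comp_def]
  have hnd : (pvCanonD W g).keys.Nodup := by
    rw [hkeys]
    exact (List.nodup_range).map (fun a b h => by exact_mod_cast h)
  by_cases hj : j < W
  · rw [if_pos hj]
    refine PySem.Dict.get?_of_mem_items _ ?_ hnd
    exact List.mem_map.2 ⟨j, List.mem_range.2 hj, rfl⟩
  · rw [if_neg hj]
    rw [PySem.Dict.get?_eq_none_iff_not_mem_keys, hkeys]
    intro hmem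
    rcases List.mem_map.1 hmem with ⟨i, hi, hij⟩
    have : i = j := by exact_mod_cast hij
    exact hj (this ▸ List.mem_range.1 hi)

theorem pvLink_lemma (t : List Char) :
    ∀ (k W : Nat) (g : Nat → PySem.Dict String Int), k ≤ W →
    (PySem.List.enumerate t (k : Int)).foldl pvDictStep (pvCanonD W g)
      = pvCanonD (max W (k + t.length)) (pvUpd t k W g) := by
  induction t with
  | nil =>
    intro k W g hkW
    simp only [PySem.List.enumerate_nil, List.foldl_nil, List.length_nil]
    rw [show max W (k + 0) = W by omega]
    unfold pvCanonD
    congr 1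
    refine List.map_congr_left (fun i hi => ?_)
    have hiW : i < W := List.mem_range.1 hi
    simp [pvUpd, pvG, hiW]
  | cons c t ih =>
    intro k W g hkW
    rw [PySem.List.enumerate_cons, List.foldl_cons]
    have hgetD : (pvCanonD W g).getD (k : Int) PySem.Dict.empty = pvG W g k := by
      rw [PySem.Dict.getD_eq_get?_getD, pvGet_canonD]
      unfold pvG
      by_cases h : k < W <;> simp [h]
    have hstep : pvDictStep (pvCanonD W g) ((k : Int), c)
        = pvCanonD (max W (k + 1))
            (fun i => if i = k then pvColStep (pvG W g k) c else pvG W g i) := by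
      simp only [pvDictStep, hgetD]
      by_cases hkWlt : k < W
      · have hcont : (pvCanonD W g).contains (k : Int) = true := by
          rw [PySem.Dict.contains_eq_isSome_get?, pvGet_canonD, if_pos hkWlt]; rfl
        apply PySem.Dict.ext
        rw [PySem.Dict.items_insert_of_contains _ _ hcont]
        rw [show max W (k + 1) = W by omega]
        show (((List.range W).map (fun i : Nat => ((i : Int), g i))).map _) = _
        rw [List.map_map]
        refine List.map_congr_left (fun i hi => ?_)
        have hiW : i < W := List.mem_range.1 hi
        simp only [Function.comp_apply]
        by_cases hik : i = k
        · subst hik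
          simp [pvG, hiW]
        · have hne : ((i : Int) == (k : Int)) = false := by
            simp only [beq_eq_false_iff_ne, ne_eq]
            exact_mod_cast hik
          simp [hne, pvG, hiW, hik]
      · have hkW' : k = W := by omega
        subst hkW'
        have hcont : (pvCanonD k g).contains (k : Int) = false := by
          rw [PySem.Dict.contains_eq_isSome_get?, pvGet_canonD]; simp
        apply PySem.Dict.ext
        rw [PySem.Dict.items_insert_of_not_contains _ _ hcont]
        rw [show max k (k + 1) = k + 1 by omega]
        show _ = ((List.range (k + 1)).map _)
        rw [List.range_succ, List.map_append]
        congr 1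
        · refine List.map_congr_left (fun i hi => ?_)
          have hik : i < k := List.mem_range.1 hi
          simp [pvG, hik, Nat.ne_of_lt hik]
        · simp [pvG]
    rw [hstep]
    rw [show ((k : Int) + 1) = (((k + 1 : Nat)) : Int) by push_cast; ring]
    rw [ih (k + 1) (max W (k + 1)) _ (by omega)]
    rw [show max (max W (k + 1)) (k + 1 + t.length) = max W (k + (c :: t).length) by
      simp only [List.length_cons]; omega]
    unfold pvCanonD
    congr 1
    refine List.map_congr_left (fun i hi => ?_)
    have hG1 : pvG (max W (k + 1))
        (fun i => if i = k then pvColStep (pvG W g k) c else pvG W g i) i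
        = if i = k then pvColStep (pvG W g k) c else pvG W g i := by
      unfold pvG
      by_cases hik : i = k
      · subst hik; simp [show i < max W (i + 1) by omega]
      · by_cases hiW1 : i < max W (k + 1)
        · simp [hiW1, hik]
        · simp only [if_neg hiW1, if_neg hik, if_neg (show ¬ i < W by omega)]
    rcases Nat.lt_trichotomy i k with hik | hik | hik
    · -- i < k : neither side updates
      have h1 : i - (k + 1) = 0 := by omega
      have h2 : i - k = 0 := by omega
      unfold pvUpd
      rw [h1, h2, List.getElem?_cons_zero]
      have hnotk1 : ¬ (k + 1 ≤ i) := by omega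
      have hnotk : ¬ (k ≤ i) := by omega
      cases ht0 : t[0]? with
      | none => simp [hnotk, hG1, Nat.ne_of_lt hik]
      | some c' => simp [hnotk1, hnotk, hG1, Nat.ne_of_lt hik]
    · -- i = k : the head char lands here
      subst hik
      have h1 : i - (i + 1) = 0 := by omega
      have h2 : i - i = 0 := by omega
      unfold pvUpd
      rw [h1, h2, List.getElem?_cons_zero]
      have hnotk1 : ¬ (i + 1 ≤ i) := by omega
      cases ht0 : t[0]? with
      | none => simp [hG1]
      | some c' => simp [hnotk1, hG1]
    · -- k < i : the head is skipped, tail indexing shifts by one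
      have h1 : i - k = (i - (k + 1)) + 1 := by omega
      unfold pvUpd
      rw [h1, List.getElem?_cons_succ]
      have hk1 : k + 1 ≤ i := by omega
      have hk : k ≤ i := by omega
      cases ht0 : t[i - (k + 1)]? with
      | none => simp [hG1, Nat.ne_of_gt hik]
      | some c' => simp [hk1, hk, hG1, Nat.ne_of_gt hik]

theorem pvWidth_bound (ls : List String) : ∀ w : Nat,
    w ≤ ls.foldl (fun w l => if l.toList.length > w then l.toList.length else w) w ∧
    ∀ l ∈ ls, l.toList.length ≤
      ls.foldl (fun w l => if l.toList.length > w then l.toList.length else w) w := by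
  induction ls with
  | nil => intro w; exact ⟨le_refl w, by simp⟩
  | cons x ls ih =>
    intro w
    simp only [List.foldl_cons]
    set w1 := if x.toList.length > w then x.toList.length else w with hw1
    have hww1 : w ≤ w1 ∧ x.toList.length ≤ w1 := by
      rw [hw1]; split_ifs with h <;> omega
    obtain ⟨h1, h2⟩ := ih w1
    refine ⟨le_trans hww1.1 h1, fun l hl => ?_⟩
    rcases List.mem_cons.1 hl with rfl | hl
    · exact le_trans hww1.2 h1
    · exact h2 l hl

theorem pvCol_of_ge (ls : List String) (i : Nat) (h : ∀ l ∈ ls, l.toList[i]? = none) :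
    pvCol ls i = PySem.Dict.empty := by
  unfold pvCol
  induction ls with
  | nil => rfl
  | cons x ls ih =>
    rw [List.foldl_cons, h x (by simp)]
    exact ih (fun l hl => h l (by simp [hl]))

theorem pvDictFold_eq (links : List String) :
    pvDictFold links = pvCanonD (pvWidth links) (pvCol links) := by
  induction links using List.reverseRecOn with
  | nil =>
    apply PySem.Dict.ext
    simp [pvDictFold, pvCanonD, pvWidth, pvCol, PySem.Dict.empty]
  | append_singleton ls l ih =>
    have hW : pvWidth (ls ++ [l]) = max (pvWidth ls) l.toList.length := by
      unfold pvWidth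
      rw [List.foldl_append, List.foldl_cons, List.foldl_nil]
      split_ifs with h <;> omega
    have hfold : pvDictFold (ls ++ [l])
        = (PySem.List.enumerate l.toList ((0 : Nat) : Int)).foldl pvDictStep (pvDictFold ls) := by
      unfold pvDictFold
      rw [List.foldl_append, List.foldl_cons, List.foldl_nil]
      norm_num
    rw [hfold, ih, pvLink_lemma l.toList 0 (pvWidth ls) (pvCol ls) (Nat.zero_le _)]
    rw [show max (pvWidth ls) (0 + l.toList.length) = pvWidth (ls ++ [l]) by rw [hW]; omega]
    unfold pvCanonD
    congr 1
    refine List.map_congr_left (fun i _ => ?_)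
    have hG : pvG (pvWidth ls) (pvCol ls) i = pvCol ls i := by
      unfold pvG
      split_ifs with h
      · rfl
      · rw [pvCol_of_ge]
        intro l' hl'
        refine List.getElem?_eq_none ?_
        have := (pvWidth_bound ls 0).2 l' hl'
        unfold pvWidth at h
        omega
    have hcolapp : pvCol (ls ++ [l]) i
        = (match l.toList[i]? with
           | some c => pvColStep (pvCol ls i) c
           | none => pvCol ls i) := by
      unfold pvCol
      rw [List.foldl_append, List.foldl_cons, List.foldl_nil]
    rw [hcolapp]
    unfold pvUpd
    rw [Nat.sub_zero]
    cases l.toList[i]? with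
    | none => simp [hG]
    | some c => simp [hG]

theorem pvEnum_nonneg (xs : List Char) : ∀ p ∈ PySem.List.enumerate xs 0, 0 ≤ p.1 := by
  intro p hp
  rcases (PySem.List.mem_enumerate_iff xs 0 p).1 hp with ⟨k, hk, rfl⟩
  simp

theorem pvFold_chars (N : Nat) (ps : List (Int × Char)) :
    ∀ pc cs, (∀ p ∈ ps, 0 ≤ p.1) → pvInv cs → pvRel N pc cs →
    (ps.foldl pvStepA (pc, cs)).2 = ps.foldl pvDictStep cs ∧
      pvInv (ps.foldl pvDictStep cs) ∧
      pvRel N (ps.foldl pvStepA (pc, cs)).1 (ps.foldl pvDictStep cs) := by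
  induction ps with
  | nil => intro pc cs _ hinv hrel; exact ⟨rfl, hinv, hrel⟩
  | cons p rest ih =>
    intro pc cs hnn hinv hrel
    obtain ⟨heq, hinv', hrel'⟩ := pvStep_eq N pc cs p (hnn p (by simp)) hinv hrel
    simp only [List.foldl_cons]
    rw [show pvStepA (pc, cs) p = ((pvStepA (pc, cs) p).1, pvDictStep cs p) by rw [← heq]]
    exact ih _ _ (fun q hq => hnn q (by simp [hq])) hinv' hrel'

theorem pvFold_links (N : Nat) (ls : List String) :
    ∀ pc cs, pvInv cs → pvRel N pc cs →
    (ls.foldl (fun st link => (PySem.List.enumerate link.toList).foldl pvStepA st) (pc, cs)).2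
        = ls.foldl (fun cs link => (PySem.List.enumerate link.toList).foldl pvDictStep cs) cs ∧
      pvInv (ls.foldl (fun cs link => (PySem.List.enumerate link.toList).foldl pvDictStep cs) cs) ∧
      pvRel N (ls.foldl (fun st link => (PySem.List.enumerate link.toList).foldl pvStepA st) (pc, cs)).1
        (ls.foldl (fun cs link => (PySem.List.enumerate link.toList).foldl pvDictStep cs) cs) := by
  induction ls with
  | nil => intro pc cs hinv hrel; exact ⟨rfl, hinv, hrel⟩
  | cons l rest ih =>
    intro pc cs hinv hrel
    obtain ⟨heq, hinv', hrel'⟩ :=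
      pvFold_chars N (PySem.List.enumerate l.toList) pc cs (pvEnum_nonneg _) hinv hrel
    simp only [List.foldl_cons]
    rw [show (PySem.List.enumerate l.toList).foldl pvStepA (pc, cs)
        = (((PySem.List.enumerate l.toList).foldl pvStepA (pc, cs)).1,
           (PySem.List.enumerate l.toList).foldl pvDictStep cs) by rw [← heq]]
    exact ih _ _ hinv' hrel'

theorem pvWidth_le (ls : List String) (N : Nat) (h : ∀ l ∈ ls, l.toList.length ≤ N) :
    pvWidth ls ≤ N := by
  unfold pvWidth
  suffices hgen : ∀ w : Nat, w ≤ N →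
      ls.foldl (fun w l => if l.toList.length > w then l.toList.length else w) w ≤ N from
    hgen 0 (Nat.zero_le N)
  induction ls with
  | nil => intro w hw; exact hw
  | cons x ls ih =>
    intro w hw
    rw [List.foldl_cons]
    refine ih (fun l hl => h l (by simp [hl])) _ ?_
    have := h x (by simp)
    split_ifs <;> omega

theorem pvSetFold (v : Nat → Int) (W : Nat) (init : List Int) :
    ((List.range W).foldl (fun pc i => pc.set i (v i)) init).length = init.length ∧
    ∀ j : Nat, ((List.range W).foldl (fun pc i => pc.set i (v i)) init).getD j 0
      = if j < W ∧ j < init.length then v j else init.getD j 0 := by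
  induction W with
  | zero => exact ⟨rfl, fun j => by simp⟩
  | succ W ih =>
    rw [List.range_succ, List.foldl_append, List.foldl_cons, List.foldl_nil]
    obtain ⟨ihlen, ihval⟩ := ih
    constructor
    · rw [List.length_set, ihlen]
    · intro j
      rw [List.getD_eq_getElem?_getD, List.getElem?_set, ihlen]
      by_cases hjW : W = j
      · subst hjW
        rw [if_pos rfl]
        by_cases hlen : W < init.length
        · simp [hlen]
        · rw [if_neg hlen, if_neg (by omega)]
          simp [List.getD_eq_getElem?_getD, List.getElem?_eq_none (Nat.le_of_not_lt hlen)]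
      · rw [if_neg hjW, ← List.getD_eq_getElem?_getD, ihval]
        by_cases h1 : j < W ∧ j < init.length
        · rw [if_pos h1, if_pos ⟨by omega, h1.2⟩]
        · rw [if_neg h1, if_neg (by omega)]

theorem pvmain (links : List String) (max_len : Int)
    (hpre : Pre_count_char_occurrance links max_len) :
    count_char_occurrance links max_len = count_char_occurrance_alt links max_len := by
  unfold count_char_occurrance count_char_occurrance_alt
  simp only
  set W := pvWidth links with hWdef
  set N := max_len.toNat with hNdef
  set col := pvCol links with hcoldef
  -- the initial position_count list is a replicate
  have hinit : (PySem.List.pyRange 0 max_len 1).map (fun _ => (0 : Int))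
      = List.replicate N 0 := by
    rw [PySem.List.pyRange_one, List.map_map, hNdef]
    simp [Function.comp_def, List.map_const', List.length_range]
  rw [hinit]
  -- A's fold: the dict is pvDictFold, the pc list tracks its entry sizes
  obtain ⟨heq, hinv, hrel⟩ := pvFold_links N links (List.replicate N 0) PySem.Dict.empty
    ⟨by simp [PySem.Dict.keys, PySem.Dict.empty], by simp [PySem.Dict.keys, PySem.Dict.empty]⟩
    ⟨by simp, by intro j hj; simp [PySem.Dict.get?_empty]⟩
  have hDA : (links.foldl
      (fun st link => (PySem.List.enumerate link.toList).foldl pvStepA st)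
      (List.replicate N 0, PySem.Dict.empty)).2 = pvCanonD W col := by
    rw [heq]
    exact pvDictFold_eq links
  -- B's counts dict is the same canonical dict
  have hrange : PySem.List.pyRange 0 (W : Int) 1 = (List.range W).map (fun i : Nat => (i : Int)) := by
    rw [PySem.List.pyRange_one]
    simp
  have hcounts : (PySem.List.pyRange 0 (W : Int) 1).foldl
      (fun cs i => cs.insert i (pvCol links i.toNat)) PySem.Dict.empty = pvCanonD W col := by
    rw [hrange]
    apply PySem.Dict.ext
    rw [List.foldl_map]
    rw [PySem.Dict.items_foldl_insert_fresh (List.range W) (fun i : Nat => (i : Int))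
      (fun i : Nat => pvCol links ((i : Int)).toNat) PySem.Dict.empty
      (fun a _ => by simp [PySem.Dict.contains_empty])
      ((List.nodup_range).map (fun a b h => by exact_mod_cast h))]
    simp only [pvCanonD, PySem.Dict.empty, List.nil_append]
    refine List.map_congr_left (fun i _ => ?_)
    simp [hcoldef]
  rw [hcounts]
  -- width fits inside the position_count list (this is where Pre_ is used)
  have hWN : W ≤ N := by
    refine pvWidth_le links N (fun l hl => ?_)
    rcases hpre l hl with h | h
    · have : PySem.Str.len l = l.toList.length := by simp [PySem.Str.len_eq]
      omega
    · have : PySem.Str.len l = l.toList.length := by simp [PySem.Str.len_eq]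
      omega
  refine Prod.ext ?_ (by rw [hDA])
  -- position_count lists agree entrywise
  have hBpc : (PySem.List.pyRange 0 (W : Int) 1).foldl
        (fun pc i => pc.set i.toNat (((pvCanonD W col).getD i PySem.Dict.empty).size : Int))
        (List.replicate N 0)
      = (List.range W).foldl
        (fun pc i => pc.set i (((pvCanonD W col).getD (i : Int) PySem.Dict.empty).size : Int))
        (List.replicate N 0) := by
    rw [hrange, List.foldl_map]
    simp
  rw [hBpc]
  obtain ⟨hBlen, hBval⟩ := pvSetFold
    (fun i => (((pvCanonD W col).getD (i : Int) PySem.Dict.empty).size : Int)) W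
    (List.replicate N 0)
  replace hrel : pvRel N
      (links.foldl (fun st link => (PySem.List.enumerate link.toList).foldl pvStepA st)
        (List.replicate N 0, PySem.Dict.empty)).1 (pvCanonD W col) := by
    rw [← pvDictFold_eq links]
    exact hrel
  obtain ⟨hAlen, hAval⟩ := hrel
  apply List.ext_getElem
  · rw [hAlen, hBlen, List.length_replicate]
  · intro j h1 h2
    have hjN : j < N := by rw [← hAlen]; exact h1
    rw [← List.getD_eq_getElem _ 0 h1, ← List.getD_eq_getElem _ 0 h2]
    rw [hAval j hjN, hBval j]
    rw [PySem.Dict.getD_eq_get?_getD, pvGet_canonD]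
    by_cases hjW : j < W
    · rw [if_pos hjW, if_pos ⟨hjW, by simpa using hjN⟩]
      rfl
    · rw [if_neg hjW, if_neg (by simp; omega)]
      simp [hjN]

-- ===== VERDICT (by name: the statement is the Claim_ definition above) =====
theorem count_char_occurrance_spec : Claim_equal_count_char_occurrance := by
  intro links max_len _ hpre
  exact pvmain links max_len hpre
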